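-- pv_equiv track=rewrite | github.com/sillsdev/ptx2pdf | python/lib/ptxprint/patgen.py | stagger_range
-- ===== SOURCE A (Python) =====
-- def stagger_range(start, end):
--     middle = (start + end) // 2
--     left = middle - 1
--     right = middle + 1
--     yield middle
--
--     while left >= start or right < end:
--         if left >= start:
--             yield left
--             left -= 1
--         if right < end:
--             yield right
--             right += 1
-- ===== SOURCE B (Python) =====
-- def stagger_range(start, end):
--     middle = (start + end) // 2
--     yield middle
--     yield from sorted((x for x in range(start, end) if x != middle),
--                       key=lambda x: 2 * abs(x - middle) - (x < middle))
-- ===== Notes on version B (the rewrite author's own statement) =====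
-- stated objective: alternative
-- what changed: Replaces A's two-pointer while-loop that interleaves the left and right halves with a single sort of the remaining range by staggered distance from the middle (key 2*|x-middle| - (x<middle)), yielded after the unconditional middle.
import Mathlib
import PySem

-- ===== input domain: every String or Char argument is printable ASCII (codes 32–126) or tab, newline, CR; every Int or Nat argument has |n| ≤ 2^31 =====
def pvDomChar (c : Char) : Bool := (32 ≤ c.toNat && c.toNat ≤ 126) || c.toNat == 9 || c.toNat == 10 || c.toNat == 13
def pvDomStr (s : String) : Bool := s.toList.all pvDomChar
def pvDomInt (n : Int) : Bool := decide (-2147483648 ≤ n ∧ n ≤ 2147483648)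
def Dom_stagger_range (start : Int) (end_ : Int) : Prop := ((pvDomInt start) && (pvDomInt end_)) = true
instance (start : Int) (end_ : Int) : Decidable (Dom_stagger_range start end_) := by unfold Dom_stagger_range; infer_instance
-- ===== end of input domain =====

-- B replaces A's two-pointer interleaving while-loop by a single sort of the remaining
-- range by staggered distance from the middle (objective: alternative; same return value;
-- both ports return the generator's full yield list).

-- ===== PORT A =====
-- the while-loop of A: yields left (then decrements) when left >= start,
-- yields right (then increments) when right < end
def staggerLoop (start : Int) (end_ : Int) (left : Int) (right : Int) : List Int :=
  if left ≥ start ∨ right < end_ then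
    (if left ≥ start then [left] else []) ++
    (if right < end_ then [right] else []) ++
    staggerLoop start end_ (if left ≥ start then left - 1 else left)
      (if right < end_ then right + 1 else right)
  else []
termination_by ((left - start + 1).toNat + (end_ - right).toNat)
decreasing_by
  split_ifs <;> omega

def stagger_range (start : Int) (end_ : Int) : List Int :=
  let middle := PySem.Int.floordiv (start + end_) 2
  middle :: staggerLoop start end_ (middle - 1) (middle + 1)

-- ===== PORT B =====
def stagger_range_alt (start : Int) (end_ : Int) : List Int :=
  let middle := PySem.Int.floordiv (start + end_) 2
  middle :: PySem.List.sorted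
    ((PySem.List.pyRange start end_ 1).filter (fun x => x ≠ middle))
    (fun x => 2 * |x - middle| - (if x < middle then 1 else 0))

-- ===== PRECONDITION & SPEC =====
def Spec_stagger_range (start : Int) (end_ : Int) (out : List Int) : Prop := out = stagger_range_alt start end_
instance (start : Int) (end_ : Int) (out : List Int) : Decidable (Spec_stagger_range start end_ out) := by unfold Spec_stagger_range; infer_instance

-- ===== CLAIM (what is proved, stated in full; the proofs are below) =====
def Claim_equal_stagger_range : Prop := ∀ (start : Int) (end_ : Int), Dom_stagger_range start end_ → Spec_stagger_range start end_ (stagger_range start end_)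

-- ===== LEMMAS AND PROOFS =====

-- [l, l-1, ..., s]
def descList (l : Int) (s : Int) : List Int :=
  if l ≥ s then l :: descList (l - 1) s else []
termination_by (l - s + 1).toNat
decreasing_by omega

-- [r, r+1, ..., e-1]
def ascList (r : Int) (e : Int) : List Int :=
  if r < e then r :: ascList (r + 1) e else []
termination_by (e - r).toNat
decreasing_by omega

lemma descList_pos {l s : Int} (h : l ≥ s) : descList l s = l :: descList (l - 1) s := by
  rw [descList, if_pos h]

lemma descList_neg {l s : Int} (h : ¬ l ≥ s) : descList l s = [] := by
  rw [descList, if_neg h]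

lemma ascList_pos {r e : Int} (h : r < e) : ascList r e = r :: ascList (r + 1) e := by
  rw [ascList, if_pos h]

lemma ascList_neg {r e : Int} (h : ¬ r < e) : ascList r e = [] := by
  rw [ascList, if_neg h]

def interleave : List Int → List Int → List Int
  | [], ys => ys
  | x :: xs, [] => x :: xs
  | x :: xs, y :: ys => x :: y :: interleave xs ys

lemma interleave_nil_right (xs : List Int) : interleave xs [] = xs := by
  cases xs <;> rfl

lemma interleave_perm (xs ys : List Int) : (interleave xs ys).Perm (xs ++ ys) := by
  induction xs generalizing ys with
  | nil => simp [interleave]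
  | cons x xs ih =>
    cases ys with
    | nil => simp [interleave]
    | cons y ys =>
      simp only [interleave]
      refine List.Perm.cons x (((ih ys).cons y).trans List.perm_middle.symm)

lemma mem_interleave {x : Int} {xs ys : List Int} (h : x ∈ interleave xs ys) :
    x ∈ xs ∨ x ∈ ys := by
  have := (interleave_perm xs ys).mem_iff.mp h
  simpa using this

lemma mem_descList {x l s : Int} (h : x ∈ descList l s) : s ≤ x ∧ x ≤ l := by
  induction l using descList.induct (s := s) with
  | case1 l hls ih =>
    rw [descList_pos hls] at h
    rcases List.mem_cons.mp h with rfl | h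
    · omega
    · have := ih h; omega
  | case2 l hls =>
    rw [descList_neg hls] at h
    simp at h

lemma mem_ascList {x r e : Int} (h : x ∈ ascList r e) : r ≤ x ∧ x < e := by
  induction r using ascList.induct (e := e) with
  | case1 r hre ih =>
    rw [ascList_pos hre] at h
    rcases List.mem_cons.mp h with rfl | h
    · omega
    · have := ih h; omega
  | case2 r hre =>
    rw [ascList_neg hre] at h
    simp at h

-- A's loop is the interleaving of the descending left list and the ascending right list
lemma staggerLoop_eq_interleave (s e l r : Int) :
    staggerLoop s e l r = interleave (descList l s) (ascList r e) := by
  induction l, r using staggerLoop.induct (start := s) (end_ := e) with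
  | case1 l r hcond ih =>
    simp only [dite_eq_ite] at ih
    rw [staggerLoop, if_pos hcond]
    by_cases hl : l ≥ s <;> by_cases hr : r < e
    · simp only [if_pos hl, if_pos hr] at ih ⊢
      rw [ih, descList_pos hl, ascList_pos hr, interleave]
      simp
    · simp only [if_pos hl, if_neg hr] at ih ⊢
      rw [ih]
      simp [descList_pos hl, ascList_neg hr, interleave_nil_right]
    · simp only [if_neg hl, if_pos hr] at ih ⊢
      rw [ih]
      simp [descList_neg hl, ascList_pos hr, interleave]
    · exact absurd hcond (by omega)
  | case2 l r hcond =>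
    rw [staggerLoop, if_neg hcond]
    have hl : ¬ l ≥ s := by omega
    have hr : ¬ r < e := by omega
    rw [descList_neg hl, ascList_neg hr, interleave]

lemma descList_perm_pyRange (l s : Int) :
    (descList l s).Perm (PySem.List.pyRange s (l + 1) 1) := by
  induction l using descList.induct (s := s) with
  | case1 l hls ih =>
    rw [descList_pos hls]
    have hstep : PySem.List.pyRange s (l + 1) 1
        = PySem.List.pyRange s l 1 ++ [l] := by
      have := PySem.List.pyRange_one_succ_right (a := s) (b := l) (by omega)
      simpa using this
    rw [hstep]
    refine ((ih.cons l).trans ?_)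
    simpa using (List.perm_middle (a := l) (l₁ := PySem.List.pyRange s l 1)
      (l₂ := ([] : List Int))).symm
  | case2 l hls =>
    rw [descList_neg hls]
    have : PySem.List.pyRange s (l + 1) 1 = [] := by
      rw [PySem.List.pyRange_one]
      have : (l + 1 - s).toNat = 0 := by omega
      simp [this]
    rw [this]

lemma ascList_eq_pyRange (r e : Int) :
    ascList r e = PySem.List.pyRange r e 1 := by
  induction r using ascList.induct (e := e) with
  | case1 r hre ih =>
    rw [ascList_pos hre, ih, PySem.List.pyRange_one_cons hre]
  | case2 r hre =>
    rw [ascList_neg hre, PySem.List.pyRange_one]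
    have : (e - r).toNat = 0 := by omega
    simp [this]

-- the loop's output is a permutation of the range with the middle removed
lemma tail_perm (s e mid : Int) (hmid : 2 * mid ≤ s + e ∧ s + e < 2 * mid + 2) :
    (staggerLoop s e (mid - 1) (mid + 1)).Perm
      ((PySem.List.pyRange s e 1).filter (fun x => x ≠ mid)) := by
  rw [staggerLoop_eq_interleave]
  refine (interleave_perm _ _).trans ?_
  by_cases hse : s < e
  · have hb : s ≤ mid ∧ mid < e := by omega
    have hsplit : PySem.List.pyRange s e 1
        = PySem.List.pyRange s mid 1 ++ mid :: PySem.List.pyRange (mid + 1) e 1 := by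
      rw [PySem.List.pyRange_one_append s mid e (by omega) (by omega),
        PySem.List.pyRange_one_cons (by omega : mid < e)]
    have hleft : (PySem.List.pyRange s mid 1).filter (fun x => x ≠ mid)
        = PySem.List.pyRange s mid 1 := by
      refine List.filter_eq_self.mpr ?_
      intro a ha
      have := PySem.List.mem_pyRange_one.mp ha
      simpa using by omega
    have hright : (PySem.List.pyRange (mid + 1) e 1).filter (fun x => x ≠ mid)
        = PySem.List.pyRange (mid + 1) e 1 := by
      refine List.filter_eq_self.mpr ?_
      intro a ha
      have := PySem.List.mem_pyRange_one.mp ha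
      simpa using by omega
    have hfilter : ((PySem.List.pyRange s e 1).filter (fun x => x ≠ mid))
        = PySem.List.pyRange s mid 1 ++ PySem.List.pyRange (mid + 1) e 1 := by
      rw [hsplit, List.filter_append, List.filter_cons, hleft, hright]
      simp
    rw [hfilter, ascList_eq_pyRange]
    exact ((descList_perm_pyRange (mid - 1) s).append_right _).trans
      (by simp [show mid - 1 + 1 = mid by ring])
  · -- empty range: every list involved is empty
    have h1 : descList (mid - 1) s = [] := descList_neg (by omega)
    have h2 : ascList (mid + 1) e = [] := ascList_neg (by omega)
    have h3 : PySem.List.pyRange s e 1 = [] := by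
      rw [PySem.List.pyRange_one]
      have : (e - s).toNat = 0 := by omega
      simp [this]
    simp [h1, h2, h3]

-- the staggered-distance key B sorts by
def skey (mid : Int) (x : Int) : Int := 2 * |x - mid| - (if x < mid then 1 else 0)

lemma skey_of_lt {mid x : Int} (h : x < mid) : skey mid x = 2 * (mid - x) - 1 := by
  rw [skey, abs_of_neg (by omega), if_pos h]; ring

lemma skey_of_gt {mid x : Int} (h : mid < x) : skey mid x = 2 * (x - mid) := by
  rw [skey, abs_of_pos (by omega), if_neg (by omega)]; ring

lemma pairwise_descList {mid l s : Int} (h : l < mid) :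
    (descList l s).Pairwise (fun a b => skey mid a < skey mid b) := by
  induction l using descList.induct (s := s) with
  | case1 l hls ih =>
    rw [descList_pos hls]
    refine List.Pairwise.cons ?_ (ih (by omega))
    intro y hy
    have hb := mem_descList hy
    rw [skey_of_lt h, skey_of_lt (by omega)]
    omega
  | case2 l hls =>
    rw [descList_neg hls]; exact List.Pairwise.nil

lemma pairwise_ascList {mid r e : Int} (h : mid < r) :
    (ascList r e).Pairwise (fun a b => skey mid a < skey mid b) := by
  induction r using ascList.induct (e := e) with
  | case1 r hre ih =>
    rw [ascList_pos hre]
    refine List.Pairwise.cons ?_ (ih (by omega))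
    intro y hy
    have hb := mem_ascList hy
    rw [skey_of_gt h, skey_of_gt (by omega)]
    omega
  | case2 r hre =>
    rw [ascList_neg hre]; exact List.Pairwise.nil

-- core ordering fact: the interleaving at symmetric distance d ≥ 1 is strictly
-- key-increasing
lemma pairwise_interleave (mid s e : Int) (d : Int) (hd : 1 ≤ d) :
    (interleave (descList (mid - d) s) (ascList (mid + d) e)).Pairwise
      (fun a b => skey mid a < skey mid b) := by
  by_cases hl : mid - d ≥ s <;> by_cases hr : mid + d < e
  · rw [descList_pos hl, ascList_pos hr, interleave]
    have hrec := pairwise_interleave mid s e (d + 1) (by omega)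
    rw [show mid - d - 1 = mid - (d + 1) by ring, show mid + d + 1 = mid + (d + 1) by ring] at *
    have hmem : ∀ y ∈ interleave (descList (mid - (d + 1)) s) (ascList (mid + (d + 1)) e),
        2 * d < skey mid y := by
      intro y hy
      rcases mem_interleave hy with h | h
      · have hb := mem_descList h
        rw [skey_of_lt (by omega)]; omega
      · have hb := mem_ascList h
        rw [skey_of_gt (by omega)]; omega
    refine List.Pairwise.cons ?_ (List.Pairwise.cons ?_ hrec)
    · intro y hy
      rw [skey_of_lt (by omega)]
      rcases List.mem_cons.mp hy with rfl | hy
      · rw [skey_of_gt (by omega)]; omega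
      · have := hmem y hy; omega
    · intro y hy
      rw [skey_of_gt (by omega)]
      have := hmem y hy; omega
  · rw [ascList_neg hr, interleave_nil_right]
    exact pairwise_descList (by omega)
  · rw [descList_neg hl, interleave]
    exact pairwise_ascList (by omega)
  · rw [descList_neg hl, ascList_neg hr, interleave]
    exact List.Pairwise.nil
termination_by ((mid - d - s + 1).toNat + (e - (mid + d)).toNat)
decreasing_by omega

-- ===== VERDICT (by name: the statement is the Claim_ definition above) =====
theorem stagger_range_spec : Claim_equal_stagger_range := by
  intro start end_ _
  unfold Spec_stagger_range stagger_range stagger_range_alt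
  simp only
  set mid := PySem.Int.floordiv (start + end_) 2 with hmid
  have hdm := PySem.Int.floordiv_mul_add_mod (start + end_) 2
  have hm0 := PySem.Int.mod_nonneg (start + end_) (by omega : (0:Int) < 2)
  have hm1 := PySem.Int.mod_lt (start + end_) (by omega : (0:Int) < 2)
  rw [← hmid] at hdm
  have hbounds : 2 * mid ≤ start + end_ ∧ start + end_ < 2 * mid + 2 := by omega
  congr 1
  have hperm := tail_perm start end_ mid hbounds
  have hpw : (staggerLoop start end_ (mid - 1) (mid + 1)).Pairwise
      (fun a b => (2 * |a - mid| - (if a < mid then 1 else 0))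
        < 2 * |b - mid| - (if b < mid then 1 else 0)) := by
    have := pairwise_interleave mid start end_ 1 le_rfl
    rw [staggerLoop_eq_interleave]
    simpa [skey] using this
  exact (PySem.List.sorted_eq_of_perm_of_pairwise_lt _ _
    (fun x => 2 * |x - mid| - (if x < mid then 1 else 0)) hperm hpw).symm
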